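-- pv_equiv track=rewrite | github.com/plewto/Llia | llia/synths/cascade/cascade_data.py | _fill_gate_list
-- ===== SOURCE A (Python) =====
-- def _bool(obj):
--     if obj:
--         return 1
--     else:
--         return 0
--
-- def _fill_gate_list(lst):
--     template = [0]*7
--     acc = []
--     for i,dflt in enumerate(template):
--         try:
--             a = _bool(lst[i])
--             acc.append(a)
--         except IndexError:
--             acc.append(dflt)
--     return acc
-- ===== SOURCE B (Python) =====
-- def _fill_gate_list(lst):
--     acc = [1 if x else 0 for x in lst[:7]]
--     acc += [0] * (7 - len(acc))
--     return acc
-- ===== Notes on version B (the rewrite author's own statement) =====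
-- stated objective: simpler
-- what changed: Replaces the indexed template loop with per-element try/except IndexError by a slice-then-map over the first 7 elements followed by zero padding.
import Mathlib
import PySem

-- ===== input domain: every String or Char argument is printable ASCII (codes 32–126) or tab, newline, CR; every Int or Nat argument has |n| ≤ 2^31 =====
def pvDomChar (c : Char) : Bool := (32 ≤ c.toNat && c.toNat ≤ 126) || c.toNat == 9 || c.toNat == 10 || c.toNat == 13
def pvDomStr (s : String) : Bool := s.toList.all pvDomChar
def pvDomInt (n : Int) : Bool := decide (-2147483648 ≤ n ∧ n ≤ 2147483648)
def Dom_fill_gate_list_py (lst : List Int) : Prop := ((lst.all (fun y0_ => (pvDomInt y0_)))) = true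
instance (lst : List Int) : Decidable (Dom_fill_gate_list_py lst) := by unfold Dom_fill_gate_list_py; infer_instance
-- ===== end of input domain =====

-- ===== PORT A =====
-- B changes the decomposition: slice-map-pad instead of A's indexed template loop with IndexError handling (objective: simpler).
-- port of _bool
def pyBool_fill (obj : Int) : Int := if obj ≠ 0 then 1 else 0

-- port of A: loop over enumerate(template), lst[i] via pyGet? (none = IndexError -> append dflt)
def fill_gate_list_py (lst : List Int) : List Int :=
  (PySem.List.enumerate (List.replicate 7 (0 : Int))).foldl
    (fun acc p =>
      match PySem.List.pyGet? lst p.1 with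
      | some x => acc ++ [pyBool_fill x]
      | none => acc ++ [p.2]) []

-- ===== PORT B =====
def fill_gate_list_py_alt (lst : List Int) : List Int :=
  let acc := (PySem.List.slice lst none (some (7 : Int))).map (fun x => if x ≠ 0 then 1 else 0)
  acc ++ List.replicate (7 - acc.length) 0

-- ===== PRECONDITION & SPEC =====
def Spec_fill_gate_list_py (lst : List Int) (out : List Int) : Prop := out = fill_gate_list_py_alt lst
instance (lst : List Int) (out : List Int) : Decidable (Spec_fill_gate_list_py lst out) := by unfold Spec_fill_gate_list_py; infer_instance

-- ===== CLAIM =====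
def Claim_equal_fill_gate_list_py : Prop := ∀ (lst : List Int), Dom_fill_gate_list_py lst → Spec_fill_gate_list_py lst (fill_gate_list_py lst)

-- ===== LEMMAS AND PROOFS =====

-- ===== VERDICT =====
theorem fill_gate_list_py_spec : Claim_equal_fill_gate_list_py := by
  unfold Claim_equal_fill_gate_list_py Spec_fill_gate_list_py
  intro lst _hdom
  rcases lst with _|⟨a,_|⟨b,_|⟨c,_|⟨d,_|⟨e,_|⟨f,_|⟨g,rest⟩⟩⟩⟩⟩⟩⟩
  case cons.cons.cons.cons.cons.cons.cons =>
    have e0 : PySem.List.pyGet? (a::b::c::d::e::f::g::rest) 0 = some a :=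
      PySem.List.pyGet?_zero_cons _ _
    have e1 : PySem.List.pyGet? (a::b::c::d::e::f::g::rest) 1 = some b := by
      simpa using PySem.List.pyGet?_ofNat (xs:=a::b::c::d::e::f::g::rest) (n:=1) (by simp)
    have e2 : PySem.List.pyGet? (a::b::c::d::e::f::g::rest) 2 = some c := by
      simpa using PySem.List.pyGet?_ofNat (xs:=a::b::c::d::e::f::g::rest) (n:=2) (by simp)
    have e3 : PySem.List.pyGet? (a::b::c::d::e::f::g::rest) 3 = some d := by
      simpa using PySem.List.pyGet?_ofNat (xs:=a::b::c::d::e::f::g::rest) (n:=3) (by simp)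
    have e4 : PySem.List.pyGet? (a::b::c::d::e::f::g::rest) 4 = some e := by
      simpa using PySem.List.pyGet?_ofNat (xs:=a::b::c::d::e::f::g::rest) (n:=4) (by simp)
    have e5 : PySem.List.pyGet? (a::b::c::d::e::f::g::rest) 5 = some f := by
      simpa using PySem.List.pyGet?_ofNat (xs:=a::b::c::d::e::f::g::rest) (n:=5) (by simp)
    have e6 : PySem.List.pyGet? (a::b::c::d::e::f::g::rest) 6 = some g := by
      simpa using PySem.List.pyGet?_ofNat (xs:=a::b::c::d::e::f::g::rest) (n:=6) (by simp)
    norm_num [fill_gate_list_py, fill_gate_list_py_alt, pyBool_fill,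
      PySem.List.enumerate, List.replicate, List.foldl, e0, e1, e2, e3, e4, e5, e6,
      PySem.List.slice, PySem.List.clampIdx, Int.toNat]
  all_goals
    norm_num [fill_gate_list_py, fill_gate_list_py_alt, pyBool_fill,
      PySem.List.enumerate, PySem.List.pyGet?, PySem.List.pyIdx?, List.foldl,
      PySem.List.slice, PySem.List.clampIdx, le_add_iff_nonneg_left,
      List.getElem?_cons_zero, List.getElem?_cons_succ, List.replicate,
      Int.natCast_nonneg, Int.toNat, add_assoc]
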